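-- pv_equiv track=rewrite | github.com/cybercuisine/TIL | programming/ants-atcoder/src/ants_atcoder/ch3/3-1-3/p2.py | max_min_piece
-- ===== SOURCE A (Python) =====
-- import bisect
-- from itertools import accumulate
--
-- def max_min_piece(N, A):
--     A_cum = [0] + list(accumulate(A))
--     total_sum = A_cum[-1]
--
--     left = 0
--     right = total_sum // 3
--
--     while right - left > 1:
--         mid = (left + right) // 2
--         valid = False
--
--         for i in range(1, N + 1):
--             idx1 = bisect.bisect_left(A_cum, A_cum[i - 1] + mid)
--             if idx1 > N:
--                 continue
--             idx2 = bisect.bisect_left(A_cum, A_cum[idx1] + mid)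
--             if idx2 > N:
--                 continue
--             if total_sum - A_cum[idx2] + A_cum[i - 1] >= mid:
--                 valid = True
--                 break
--
--         if valid:
--             left = mid
--         else:
--             right = mid
--
--     return left
-- ===== SOURCE B (Python) =====
-- from itertools import accumulate
--
-- def max_min_piece(N, A):
--     # Bitwise (binary-lifting) construction of the answer instead of a
--     # [lo, hi) interval binary search; the feasibility check walks two
--     # monotone pointers once over the prefix sums instead of a bisect per start.
--     cum = [0] + list(accumulate(A))
--     total = cum[-1]
--
--     def feasible(mid):
--         j = k = 0
--         for i in range(1, N + 1):
--             t1 = cum[i - 1] + mid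
--             while j <= N and cum[j] < t1:
--                 j += 1
--             if j > N:
--                 return False
--             t2 = cum[j] + mid
--             while k <= N and cum[k] < t2:
--                 k += 1
--             if k > N:
--                 return False
--             if total - cum[k] + cum[i - 1] >= mid:
--                 return True
--         return False
--
--     hi = total // 3 - 1  # candidate answers lie in [0, total // 3)
--     step = 1
--     while step * 2 <= hi:
--         step *= 2
--     ans = 0
--     while step >= 1:
--         if ans + step <= hi and feasible(ans + step):
--             ans += step
--         step //= 2
--     return ans
-- ===== Notes on version B (the rewrite author's own statement) =====
-- stated objective: alternative
-- what changed: B replaces A's [lo, hi) interval binary search by a binary-lifting construction of the answer (largest power of two, then add bits greedily), and the feasibility check's per-start bisect_left calls by a single left-to-right scan carrying two monotone pointers over the prefix sums (O(N) per check instead of O(N log N)); Pre_ excludes positive-N inputs with a negative element (A's bisect_left over the then-unsorted prefix sums yields accidental indices) and N > len(A) (A in general raises IndexError there).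
-- outside the precondition, e.g. on max_min_piece(4, [8, 5, 5, -6]): A returns 0, B returns 2; on max_min_piece(2, [4]): A returns 0, B returns 0
import Mathlib
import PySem

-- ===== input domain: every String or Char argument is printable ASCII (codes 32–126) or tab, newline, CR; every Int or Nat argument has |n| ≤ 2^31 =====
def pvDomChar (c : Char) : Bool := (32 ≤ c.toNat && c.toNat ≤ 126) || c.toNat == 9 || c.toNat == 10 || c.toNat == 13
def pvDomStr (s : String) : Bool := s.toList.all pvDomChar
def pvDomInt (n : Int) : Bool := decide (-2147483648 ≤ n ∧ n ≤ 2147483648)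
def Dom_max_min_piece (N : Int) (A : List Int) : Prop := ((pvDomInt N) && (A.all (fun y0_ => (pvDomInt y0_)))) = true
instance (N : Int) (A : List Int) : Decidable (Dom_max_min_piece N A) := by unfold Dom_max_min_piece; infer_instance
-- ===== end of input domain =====

-- B builds the answer bit by bit (binary lifting over the answer space) instead of A's
-- [lo, hi) interval binary search, and its feasibility check walks two monotone pointers
-- once over the prefix sums instead of a bisect per start (objective: alternative).


-- ===== PORT A =====
-- A_cum = [0] + list(accumulate(A))  (itertools.accumulate ported as List.scanl)
def aCum (A : List Int) : List Int := List.scanl (· + ·) 0 A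

-- A's inner 'for i in range(1, N+1)' with break: bisect.bisect_left is PySem.List.bisectLeft
def aCheck (cum : List Int) (N total mid : Int) (i : Int) : Bool :=
  if _h : i ≤ N then
    let idx1 : Int := (PySem.List.bisectLeft cum (PySem.List.pyGetD cum (i - 1) 0 + mid) : Int)
    if idx1 > N then aCheck cum N total mid (i + 1)      -- continue
    else
      let idx2 : Int := (PySem.List.bisectLeft cum (PySem.List.pyGetD cum idx1 0 + mid) : Int)
      if idx2 > N then aCheck cum N total mid (i + 1)    -- continue
      else if total - PySem.List.pyGetD cum idx2 0 + PySem.List.pyGetD cum (i - 1) 0 ≥ mid then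
        true                                             -- valid = True; break
      else aCheck cum N total mid (i + 1)
  else false
termination_by (N + 1 - i).toNat
decreasing_by all_goals omega

-- A's 'while right - left > 1' binary search
def aLoop (cum : List Int) (N total : Int) (left right : Int) : Int :=
  if _h : right - left > 1 then
    let mid := PySem.Int.floordiv (left + right) 2
    if aCheck cum N total mid 1 then aLoop cum N total mid right
    else aLoop cum N total left mid
  else left
termination_by (right - left).toNat
decreasing_by
  all_goals
    have hb := PySem.Int.floordiv_two_mid_bounds (lo := left + 1) (hi := right - 1) (by omega)
    simp only [show left + 1 + (right - 1) = left + right by ring] at hb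
    omega

def max_min_piece (N : Int) (A : List Int) : Int :=
  let cum := aCum A
  let total := PySem.List.pyGetD cum (-1) 0
  aLoop cum N total 0 (PySem.Int.floordiv total 3)

-- ===== PORT B =====
-- cum = [0] + list(accumulate(A))  (itertools.accumulate ported as List.scanl)
def bCum (A : List Int) : List Int := List.scanl (· + ·) 0 A

-- 'while j <= N and cum[j] < t: j += 1'
def bAdv (cum : List Int) (N t j : Int) : Int :=
  if _h : j ≤ N ∧ PySem.List.pyGetD cum j 0 < t then bAdv cum N t (j + 1) else j
termination_by (N + 1 - j).toNat
decreasing_by omega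

-- B's feasibility scan: one pass over i carrying the two pointers j, k
def bCheck (cum : List Int) (N total mid : Int) (i j k : Int) : Bool :=
  if _h : i ≤ N then
    let t1 := PySem.List.pyGetD cum (i - 1) 0 + mid
    let j' := bAdv cum N t1 j
    if j' > N then false
    else
      let k' := bAdv cum N (PySem.List.pyGetD cum j' 0 + mid) k
      if k' > N then false
      else if total - PySem.List.pyGetD cum k' 0 + PySem.List.pyGetD cum (i - 1) 0 ≥ mid then true
      else bCheck cum N total mid (i + 1) j' k'
  else false
termination_by (N + 1 - i).toNat
decreasing_by omega

-- 'while step * 2 <= hi: step *= 2'  (the '1 ≤ step' conjunct only makes the recursion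
-- well-founded; at the call site step starts at 1 and only doubles, so it never fails)
def bPow (hi step : Int) : Int :=
  if _h : step * 2 ≤ hi ∧ 1 ≤ step then bPow hi (step * 2) else step
termination_by (hi - step).toNat
decreasing_by omega

-- 'while step >= 1: if ans + step <= hi and feasible(ans + step): ans += step; step //= 2'
def bBits (cum : List Int) (N total hi : Int) (ans step : Int) : Int :=
  if _h : 1 ≤ step then
    let ans' := if ans + step ≤ hi ∧ bCheck cum N total (ans + step) 1 0 0 then ans + step else ans
    bBits cum N total hi ans' (PySem.Int.floordiv step 2)
  else ans
termination_by step.toNat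
decreasing_by
  rw [PySem.Int.floordiv_eq_ediv_of_pos (by omega)]
  omega

def max_min_piece_alt (N : Int) (A : List Int) : Int :=
  let cum := bCum A
  let total := PySem.List.pyGetD cum (-1) 0
  let hi := PySem.Int.floordiv total 3 - 1
  bBits cum N total hi 0 (bPow hi 1)

-- ===== PRECONDITION & SPEC =====
-- Pre_ excludes positive-N inputs whose list has a negative element (the prefix-sum array is
-- then unsorted, so A's bisect_left indices are an accident of binary search) and N greater
-- than len(A) (on which A in general raises IndexError; where it still returns, only degenerately).
def Pre_max_min_piece (N : Int) (A : List Int) : Prop :=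
  N ≤ (A.length : Int) ∧ (N ≤ 0 ∨ ∀ a ∈ A, 0 ≤ a)
instance (N : Int) (A : List Int) : Decidable (Pre_max_min_piece N A) := by
  unfold Pre_max_min_piece; infer_instance

def pvWitness_max_min_piece : Int × List Int := (6, [3, 1, 4, 1, 5, 9])

def Spec_max_min_piece (N : Int) (A : List Int) (out : Int) : Prop := out = max_min_piece_alt N A
instance (N : Int) (A : List Int) (out : Int) : Decidable (Spec_max_min_piece N A out) := by
  unfold Spec_max_min_piece; infer_instance

-- ===== CLAIM (what is proved, stated in full; the proofs are below) =====
def Claim_equal_max_min_piece : Prop := ∀ (N : Int) (A : List Int), Dom_max_min_piece N A → Pre_max_min_piece N A → Spec_max_min_piece N A (max_min_piece N A)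

-- ===== LEMMAS AND PROOFS =====

-- every element of a prefix-sum tail is at least the starting sum (elements nonnegative)
lemma pvScanl_le (s : Int) (l : List Int) (h : ∀ a ∈ l, 0 ≤ a) :
    ∀ x ∈ List.scanl (· + ·) s l, s ≤ x := by
  induction l generalizing s with
  | nil => intro x hx; simp [List.scanl] at hx; omega
  | cons a l ih =>
    intro x hx
    rw [List.scanl_cons] at hx
    rcases List.mem_cons.mp hx with rfl | hx
    · exact le_refl _
    · have ha := h a (by simp)
      have := ih (s + a) (fun b hb => h b (List.mem_cons_of_mem _ hb)) x hx
      omega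

-- the prefix-sum array of a nonnegative list is nondecreasing
lemma pvScanl_pairwise (s : Int) (l : List Int) (h : ∀ a ∈ l, 0 ≤ a) :
    (List.scanl (· + ·) s l).Pairwise (· ≤ ·) := by
  induction l generalizing s with
  | nil => simp [List.scanl]
  | cons a l ih =>
    rw [List.scanl_cons]
    refine List.Pairwise.cons ?_ (ih (s + a) (fun b hb => h b (List.mem_cons_of_mem _ hb)))
    intro x hx
    have ha := h a (by simp)
    have := pvScanl_le (s + a) l (fun b hb => h b (List.mem_cons_of_mem _ hb)) x hx
    omega

-- monotone access into a nondecreasing list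
lemma pvCgMono (cum : List Int) (hs : cum.Pairwise (· ≤ ·)) (p q : Int)
    (h0 : 0 ≤ p) (hpq : p ≤ q) (hq : q < (cum.length : Int)) :
    PySem.List.pyGetD cum p 0 ≤ PySem.List.pyGetD cum q 0 := by
  rw [PySem.List.pyGetD_eq_getElem cum 0 h0 (by omega),
      PySem.List.pyGetD_eq_getElem cum 0 (by omega) hq]
  rcases Nat.lt_or_ge p.toNat q.toNat with hlt | hge
  · exact List.pairwise_iff_getElem.mp hs _ _ (by omega) (by omega) hlt
  · have : p.toNat = q.toNat := by omega
    simp [this]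

-- bisect_left is monotone in the target on a sorted list
lemma pvBlMono (cum : List Int) (hs : cum.Pairwise (· ≤ ·)) {t t' : Int} (h : t ≤ t') :
    PySem.List.bisectLeft cum t ≤ PySem.List.bisectLeft cum t' := by
  by_contra hcon
  push Not at hcon
  obtain ⟨hle, hlt, _⟩ := PySem.List.bisectLeft_spec cum t hs
  obtain ⟨_, _, hge'⟩ := PySem.List.bisectLeft_spec cum t' hs
  have hj : PySem.List.bisectLeft cum t' < cum.length := lt_of_lt_of_le hcon hle
  have h1 := hlt _ hj hcon
  have h2 := hge' _ hj (le_refl _)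
  omega

-- B's pointer advance, started at or below the bisect point, lands on min(bisect, N+1)
lemma pvAdvEq (cum : List Int) (N t : Int) (hs : cum.Pairwise (· ≤ ·))
    (hN : N + 1 ≤ (cum.length : Int)) :
    ∀ (n : Nat) (j : Int), (N + 1 - j).toNat ≤ n → 0 ≤ j → j ≤ N + 1 →
      j ≤ (PySem.List.bisectLeft cum t : Int) →
      bAdv cum N t j = min ((PySem.List.bisectLeft cum t : Int)) (N + 1) := by
  intro n
  induction n with
  | zero =>
    intro j hm h0 h1 hb
    have hj : j = N + 1 := by omega
    rw [bAdv]
    have : ¬ (j ≤ N ∧ PySem.List.pyGetD cum j 0 < t) := by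
      intro ⟨h', _⟩; omega
    simp only [this, dite_false]
    omega
  | succ n ih =>
    intro j hm h0 h1 hb
    obtain ⟨hle, hlt, hge⟩ := PySem.List.bisectLeft_spec cum t hs
    rw [bAdv]
    by_cases hc : j ≤ N ∧ PySem.List.pyGetD cum j 0 < t
    · simp only [hc]
      have hjlen : j < (cum.length : Int) := by omega
      have hgv : PySem.List.pyGetD cum j 0 = cum[j.toNat] := by
        rw [PySem.List.pyGetD_eq_getElem cum 0 h0 hjlen]
      have hjb : j.toNat < PySem.List.bisectLeft cum t := by
        by_contra hcon
        push Not at hcon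
        have := hge j.toNat (by omega) hcon
        rw [← hgv] at this
        omega
      exact ih (j + 1) (by omega) (by omega) (by omega) (by omega)
    · simp only [hc, dite_false]
      by_cases hjN : j ≤ N
      · have hgv : PySem.List.pyGetD cum j 0 = cum[j.toNat] := by
          rw [PySem.List.pyGetD_eq_getElem cum 0 h0 (by omega)]
        have htle : t ≤ PySem.List.pyGetD cum j 0 := by
          by_contra hcon; exact hc ⟨hjN, by omega⟩
        have : PySem.List.bisectLeft cum t ≤ j.toNat := by
          by_contra hcon
          push Not at hcon
          have := hlt j.toNat (by omega) hcon
          rw [← hgv] at this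
          omega
        omega
      · omega

-- the first bisect index of A's check, as a function of the loop variable i
def pvJ (cum : List Int) (mid i : Int) : Nat :=
  PySem.List.bisectLeft cum (PySem.List.pyGetD cum (i - 1) 0 + mid)

-- the second bisect index of A's check (meaningful when pvJ ≤ N)
def pvK (cum : List Int) (mid i : Int) : Nat :=
  PySem.List.bisectLeft cum (PySem.List.pyGetD cum ((pvJ cum mid i : Int)) 0 + mid)

lemma pvJMono (cum : List Int) (hs : cum.Pairwise (· ≤ ·)) (mid N i : Int)
    (hN : N + 1 ≤ (cum.length : Int)) (h1 : 1 ≤ i) (h2 : i ≤ N) :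
    pvJ cum mid i ≤ pvJ cum mid (i + 1) := by
  unfold pvJ
  apply pvBlMono cum hs
  have := pvCgMono cum hs (i - 1) (i + 1 - 1) (by omega) (by omega) (by omega)
  omega

lemma pvKMono (cum : List Int) (hs : cum.Pairwise (· ≤ ·)) (mid N i : Int)
    (hN : N + 1 ≤ (cum.length : Int))
    (hj : (pvJ cum mid i : Int) ≤ pvJ cum mid (i + 1))
    (hj2 : (pvJ cum mid (i + 1) : Int) ≤ N) :
    pvK cum mid i ≤ pvK cum mid (i + 1) := by
  unfold pvK
  apply pvBlMono cum hs
  have := pvCgMono cum hs (pvJ cum mid i) (pvJ cum mid (i + 1)) (by omega) (by omega) (by omega)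
  omega

-- once a bisect index of A's check has run past N, every later iteration fails too
lemma pvADead (cum : List Int) (N total mid : Int) (hs : cum.Pairwise (· ≤ ·))
    (hN : N + 1 ≤ (cum.length : Int)) :
    ∀ (n : Nat) (i : Int), (N + 1 - i).toNat ≤ n → 1 ≤ i →
      (N < (pvJ cum mid i : Int) ∨ ((pvJ cum mid i : Int) ≤ N ∧ N < (pvK cum mid i : Int))) →
      aCheck cum N total mid i = false := by
  intro n
  induction n with
  | zero =>
    intro i hm h1 _
    rw [aCheck]
    have : ¬ i ≤ N := by omega
    simp [this]
  | succ n ih =>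
    intro i hm h1 hdead
    rw [aCheck]
    by_cases hiN : i ≤ N
    · simp only [hiN, dite_true]
      have hjm := pvJMono cum hs mid N i hN h1 hiN
      rcases hdead with hd1 | ⟨hd2a, hd2b⟩
      · have : ((pvJ cum mid i : Int) > N) = True := by simp; omega
        simp only [pvJ] at this
        simp only [this, if_true]
        apply ih (i + 1) (by omega) (by omega)
        left; omega
      · have hng : ¬ ((pvJ cum mid i : Int) > N) := by omega
        simp only [pvJ] at hng
        simp only [hng, if_false]
        have hkg : ((pvK cum mid i : Int) > N) = True := by simp; omega
        simp only [pvK, pvJ] at hkg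
        simp only [hkg, if_true]
        apply ih (i + 1) (by omega) (by omega)
        by_cases hjn : (pvJ cum mid (i + 1) : Int) ≤ N
        · right
          refine ⟨hjn, ?_⟩
          have := pvKMono cum hs mid N i hN (by omega) hjn
          omega
        · left; omega
    · simp [hiN]

-- the two feasibility checks agree, given the pointer invariants
lemma pvCheckEq (cum : List Int) (N total mid : Int) (hs : cum.Pairwise (· ≤ ·))
    (hN : N + 1 ≤ (cum.length : Int)) :
    ∀ (n : Nat) (i j k : Int), (N + 1 - i).toNat ≤ n → 1 ≤ i → 0 ≤ j → 0 ≤ k →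
      j ≤ N + 1 → k ≤ N + 1 → j ≤ (pvJ cum mid i : Int) →
      ((pvJ cum mid i : Int) ≤ N → k ≤ (pvK cum mid i : Int)) →
      aCheck cum N total mid i = bCheck cum N total mid i j k := by
  intro n
  induction n with
  | zero =>
    intro i j k hm h1 _ _ _ _ _ _
    rw [aCheck, bCheck]
    have : ¬ i ≤ N := by omega
    simp [this]
  | succ n ih =>
    intro i j k hm h1 hj0 hk0 hjN hkN hjb hkb
    rw [aCheck, bCheck]
    by_cases hiN : i ≤ N
    · simp only [hiN, dite_true]
      have hJfold : PySem.List.bisectLeft cum (PySem.List.pyGetD cum (i - 1) 0 + mid)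
          = pvJ cum mid i := rfl
      rw [hJfold]
      have hKfold : PySem.List.bisectLeft cum
            (PySem.List.pyGetD cum ((pvJ cum mid i : Int)) 0 + mid) = pvK cum mid i := rfl
      rw [hKfold]
      have hjadv : bAdv cum N (PySem.List.pyGetD cum (i - 1) 0 + mid) j
          = min ((pvJ cum mid i : Int)) (N + 1) :=
        pvAdvEq cum N _ hs hN (N + 1 - j).toNat j (le_refl _) hj0 hjN hjb
      rw [hjadv]
      by_cases hjg : N < (pvJ cum mid i : Int)
      · -- A's idx1 ran past N: A continues into dead iterations, B stops with False
        rw [if_pos (show (pvJ cum mid i : Int) > N by omega),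
            if_pos (show min ((pvJ cum mid i : Int)) (N + 1) > N by omega)]
        apply pvADead cum N total mid hs hN (N + 1 - (i + 1)).toNat (i + 1) (le_refl _) (by omega)
        by_cases hjn : (pvJ cum mid (i + 1) : Int) ≤ N
        · exfalso
          have := pvJMono cum hs mid N i hN h1 hiN
          omega
        · left; omega
      · -- j' = pvJ i ≤ N on both sides
        rw [if_neg (show ¬ ((pvJ cum mid i : Int) > N) by omega),
            if_neg (show ¬ (min ((pvJ cum mid i : Int)) (N + 1) > N) by omega),
            show min ((pvJ cum mid i : Int)) (N + 1) = ((pvJ cum mid i : Int)) by omega]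
        have hkb' := hkb (by omega)
        have hkadv : bAdv cum N (PySem.List.pyGetD cum ((pvJ cum mid i : Int)) 0 + mid) k
            = min ((pvK cum mid i : Int)) (N + 1) :=
          pvAdvEq cum N _ hs hN (N + 1 - k).toNat k (le_refl _) hk0 hkN hkb'
        rw [hkadv]
        by_cases hkg : N < (pvK cum mid i : Int)
        · rw [if_pos (show (pvK cum mid i : Int) > N by omega),
              if_pos (show min ((pvK cum mid i : Int)) (N + 1) > N by omega)]
          apply pvADead cum N total mid hs hN (N + 1 - (i + 1)).toNat (i + 1) (le_refl _) (by omega)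
          have hjm := pvJMono cum hs mid N i hN h1 hiN
          by_cases hjn : (pvJ cum mid (i + 1) : Int) ≤ N
          · right
            refine ⟨hjn, ?_⟩
            have := pvKMono cum hs mid N i hN (by omega) hjn
            omega
          · left; omega
        · rw [if_neg (show ¬ ((pvK cum mid i : Int) > N) by omega),
              if_neg (show ¬ (min ((pvK cum mid i : Int)) (N + 1) > N) by omega),
              show min ((pvK cum mid i : Int)) (N + 1) = ((pvK cum mid i : Int)) by omega]
          by_cases hsucc : total - PySem.List.pyGetD cum ((pvK cum mid i : Int)) 0
              + PySem.List.pyGetD cum (i - 1) 0 ≥ mid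
          · rw [if_pos hsucc, if_pos hsucc]
          · rw [if_neg hsucc, if_neg hsucc]
            have hjm := pvJMono cum hs mid N i hN h1 hiN
            apply ih (i + 1) ((pvJ cum mid i : Int)) ((pvK cum mid i : Int)) (by omega)
              (by omega) (by omega) (by omega) (by omega) (by omega) (by omega)
            intro hjn
            have := pvKMono cum hs mid N i hN (by omega) hjn
            omega
    · simp [hiN]

-- the one-iteration success condition of A's scan, with its two bisect indices
def pvSucc (cum : List Int) (N total mid i : Int) : Prop :=
  (pvJ cum mid i : Int) ≤ N ∧ (pvK cum mid i : Int) ≤ N ∧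
  total - PySem.List.pyGetD cum ((pvK cum mid i : Int)) 0
    + PySem.List.pyGetD cum (i - 1) 0 ≥ mid

-- A's scan succeeds iff some iteration from i on succeeds
lemma pvCheckIff (cum : List Int) (N total mid : Int) :
    ∀ (n : Nat) (i : Int), (N + 1 - i).toNat ≤ n →
      (aCheck cum N total mid i = true ↔
        ∃ i', i ≤ i' ∧ i' ≤ N ∧ pvSucc cum N total mid i') := by
  intro n
  induction n with
  | zero =>
    intro i hm
    rw [aCheck]
    have hni : ¬ i ≤ N := by omega
    simp only [hni, dite_false]
    constructor
    · intro h; cases h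
    · rintro ⟨i', h1, h2, _⟩; omega
  | succ n ih =>
    intro i hm
    rw [aCheck]
    by_cases hiN : i ≤ N
    · simp only [hiN, dite_true]
      have hJfold : PySem.List.bisectLeft cum (PySem.List.pyGetD cum (i - 1) 0 + mid)
          = pvJ cum mid i := rfl
      rw [hJfold]
      by_cases hjg : ((pvJ cum mid i : Int)) > N
      · rw [if_pos hjg, ih (i + 1) (by omega)]
        constructor
        · rintro ⟨i', h1, h2, h3⟩; exact ⟨i', by omega, h2, h3⟩
        · rintro ⟨i', h1, h2, h3⟩
          refine ⟨i', ?_, h2, h3⟩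
          rcases eq_or_lt_of_le h1 with rfl | h
          · exact absurd h3.1 (by omega)
          · omega
      · rw [if_neg hjg]
        have hKfold : PySem.List.bisectLeft cum
            (PySem.List.pyGetD cum ((pvJ cum mid i : Int)) 0 + mid) = pvK cum mid i := rfl
        rw [hKfold]
        by_cases hkg : ((pvK cum mid i : Int)) > N
        · rw [if_pos hkg, ih (i + 1) (by omega)]
          constructor
          · rintro ⟨i', h1, h2, h3⟩; exact ⟨i', by omega, h2, h3⟩
          · rintro ⟨i', h1, h2, h3⟩
            refine ⟨i', ?_, h2, h3⟩
            rcases eq_or_lt_of_le h1 with rfl | h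
            · exact absurd h3.2.1 (by omega)
            · omega
        · rw [if_neg hkg]
          by_cases hsucc : total - PySem.List.pyGetD cum ((pvK cum mid i : Int)) 0
              + PySem.List.pyGetD cum (i - 1) 0 ≥ mid
          · rw [if_pos hsucc]
            simp only [true_iff]
            exact ⟨i, le_refl _, hiN, by omega, by omega, hsucc⟩
          · rw [if_neg hsucc, ih (i + 1) (by omega)]
            constructor
            · rintro ⟨i', h1, h2, h3⟩; exact ⟨i', by omega, h2, h3⟩
            · rintro ⟨i', h1, h2, h3⟩
              refine ⟨i', ?_, h2, h3⟩
              rcases eq_or_lt_of_le h1 with rfl | h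
              · exact absurd h3.2.2 hsucc
              · omega
    · simp only [hiN, dite_false]
      constructor
      · intro h; cases h
      · rintro ⟨i', h1, h2, _⟩; omega

-- lowering the threshold preserves a successful iteration
lemma pvSuccMono (cum : List Int) (N total : Int) (hs : cum.Pairwise (· ≤ ·))
    (hN : N + 1 ≤ (cum.length : Int)) {mid mid' i : Int} (h : mid' ≤ mid)
    (hsucc : pvSucc cum N total mid i) : pvSucc cum N total mid' i := by
  obtain ⟨hj, hk, hval⟩ := hsucc
  have hjle : pvJ cum mid' i ≤ pvJ cum mid i := by
    unfold pvJ; exact pvBlMono cum hs (by omega)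
  have hgj : PySem.List.pyGetD cum ((pvJ cum mid' i : Int)) 0
      ≤ PySem.List.pyGetD cum ((pvJ cum mid i : Int)) 0 :=
    pvCgMono cum hs _ _ (by positivity) (by exact_mod_cast hjle) (by omega)
  have hkle : pvK cum mid' i ≤ pvK cum mid i := by
    unfold pvK
    exact pvBlMono cum hs (by omega)
  have hgk : PySem.List.pyGetD cum ((pvK cum mid' i : Int)) 0
      ≤ PySem.List.pyGetD cum ((pvK cum mid i : Int)) 0 :=
    pvCgMono cum hs _ _ (by positivity) (by exact_mod_cast hkle) (by omega)
  exact ⟨by omega, by omega, by omega⟩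

-- A's feasibility predicate is downward closed in the threshold
lemma pvCheckMono (cum : List Int) (N total : Int) (hs : cum.Pairwise (· ≤ ·))
    (hN : N + 1 ≤ (cum.length : Int)) {mid mid' : Int} (h : mid' ≤ mid)
    (ht : aCheck cum N total mid 1 = true) : aCheck cum N total mid' 1 = true := by
  rw [pvCheckIff cum N total mid (N + 1 - 1).toNat 1 (le_refl _)] at ht
  rw [pvCheckIff cum N total mid' (N + 1 - 1).toNat 1 (le_refl _)]
  obtain ⟨i', h1, h2, h3⟩ := ht
  exact ⟨i', h1, h2, pvSuccMono cum N total hs hN h h3⟩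

-- threshold 0 is always feasible (prefix sums of a nonnegative list, N ≥ 1)
lemma pvCheckZero (A : List Int) (N : Int) (hpos : ∀ a ∈ A, 0 ≤ a) (hN1 : 1 ≤ N)
    (hN : N + 1 ≤ ((aCum A).length : Int)) (hs : (aCum A).Pairwise (· ≤ ·))
    (htot : 0 ≤ PySem.List.pyGetD (aCum A) (-1) 0) :
    aCheck (aCum A) N (PySem.List.pyGetD (aCum A) (-1) 0) 0 1 = true := by
  have hhead : ∃ t, aCum A = 0 :: t := by
    cases A with
    | nil => exact ⟨[], rfl⟩
    | cons a l => exact ⟨_, List.scanl_cons⟩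
  obtain ⟨t, ht⟩ := hhead
  have hg0 : PySem.List.pyGetD (aCum A) 0 0 = 0 := by
    rw [ht]; exact PySem.List.pyGetD_zero_cons 0 t 0
  have hbl0 : PySem.List.bisectLeft (aCum A) 0 = 0 := by
    obtain ⟨hle, hlt, _⟩ := PySem.List.bisectLeft_spec (aCum A) 0 hs
    by_contra hcon
    have hpos0 : 0 < PySem.List.bisectLeft (aCum A) 0 := Nat.pos_of_ne_zero hcon
    have hlen : 0 < (aCum A).length := by rw [ht]; simp
    have h1 := hlt 0 hlen hpos0
    have h2 : (aCum A)[0]'hlen = 0 := by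
      simp only [ht]
      rfl
    omega
  rw [pvCheckIff (aCum A) N _ 0 (N + 1 - 1).toNat 1 (le_refl _)]
  refine ⟨1, le_refl _, hN1, ?_, ?_, ?_⟩
  · show ((pvJ (aCum A) 0 1 : Nat) : Int) ≤ N
    unfold pvJ
    simp only [show (1 : Int) - 1 = 0 from rfl, hg0, add_zero, hbl0]
    omega
  · show ((pvK (aCum A) 0 1 : Nat) : Int) ≤ N
    unfold pvK pvJ
    simp only [show (1 : Int) - 1 = 0 from rfl, hg0, add_zero, hbl0, Nat.cast_zero, hg0]
    omega
  · unfold pvK pvJ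
    simp only [show (1 : Int) - 1 = 0 from rfl, hg0, add_zero, hbl0, Nat.cast_zero, hg0]
    omega

-- A's binary search returns the greatest feasible threshold below 'right', given one
lemma pvALoopMax (cum : List Int) (N total M : Int)
    (hmono : ∀ a b : Int, a ≤ b → aCheck cum N total b 1 = true → aCheck cum N total a 1 = true)
    (hM : aCheck cum N total M 1 = true) :
    ∀ (n : Nat) (l r : Int), (r - l).toNat ≤ n → l ≤ M → M < r →
      (∀ m, M < m → m < r → aCheck cum N total m 1 = false) →
      aLoop cum N total l r = M := by
  intro n
  induction n with
  | zero =>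
    intro l r hm hl hr hub
    rw [aLoop]
    have : ¬ r - l > 1 := by omega
    simp only [this, dite_false]
    omega
  | succ n ih =>
    intro l r hm hl hr hub
    rw [aLoop]
    by_cases hc : r - l > 1
    · simp only [hc, dite_true]
      have hb := PySem.Int.floordiv_two_mid_bounds (lo := l + 1) (hi := r - 1) (by omega)
      rw [show l + 1 + (r - 1) = l + r by ring] at hb
      set mid := PySem.Int.floordiv (l + r) 2 with hmid
      by_cases hf : aCheck cum N total mid 1 = true
      · simp only [hf, if_true]
        have hmle : mid ≤ M := by
          by_contra hcon
          push Not at hcon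
          rw [hub mid hcon (by omega)] at hf
          cases hf
        exact ih mid r (by omega) hmle hr hub
      · simp only [hf, if_false]
        have hMlt : M < mid := by
          by_contra hcon
          push Not at hcon
          exact hf (hmono mid M hcon hM)
        exact ih l mid (by omega) hl hMlt (fun m h1 h2 => hub m h1 (by omega))
    · simp only [hc, dite_false]
      omega

-- the doubling loop yields a power of two at least its start with 2*result > hi
lemma pvBPow (hi : Int) :
    ∀ (n : Nat) (step : Int), (hi - step).toNat ≤ n → 1 ≤ step → (∃ k : Nat, step = 2 ^ k) →
      (∃ k : Nat, bPow hi step = 2 ^ k) ∧ step ≤ bPow hi step ∧ hi < 2 * bPow hi step := by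
  intro n
  induction n with
  | zero =>
    intro step hm h1 hp
    rw [bPow]
    have : ¬ (step * 2 ≤ hi ∧ 1 ≤ step) := by omega
    simp only [this, dite_false]
    exact ⟨hp, le_refl _, by omega⟩
  | succ n ih =>
    intro step hm h1 hp
    rw [bPow]
    by_cases hc : step * 2 ≤ hi ∧ 1 ≤ step
    · simp only [hc, and_self, dite_true]
      obtain ⟨k, rfl⟩ := hp
      have hrec := ih (2 ^ k * 2) (by omega) (by omega) ⟨k + 1, by ring⟩
      exact ⟨hrec.1, le_trans (by omega) hrec.2.1, hrec.2.2⟩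
    · simp only [hc, dite_false]
      exact ⟨hp, le_refl _, by omega⟩

-- the bit loop, started with a power of two bracketing M, converges to M
lemma pvBBitsMax (cum : List Int) (N total hi M : Int)
    (hmono : ∀ a b : Int, a ≤ b → bCheck cum N total b 1 0 0 = true →
      bCheck cum N total a 1 0 0 = true)
    (hM : bCheck cum N total M 1 0 0 = true) (hMhi : M ≤ hi)
    (hub : ∀ m, M < m → m ≤ hi → bCheck cum N total m 1 0 0 = false) :
    ∀ (k : Nat) (ans : Int), ans ≤ M → M < ans + 2 * 2 ^ k →
      bBits cum N total hi ans (2 ^ k) = M := by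
  intro k
  induction k with
  | zero =>
    intro ans hl hr
    rw [bBits]
    simp only [pow_zero, show (1:Int) ≤ 1 from le_refl _, dite_true]
    rw [show PySem.Int.floordiv 1 2 = 0 from rfl]
    rw [bBits]
    simp only [show ¬ (1:Int) ≤ 0 by omega, dite_false]
    by_cases hc : ans + 1 ≤ hi ∧ bCheck cum N total (ans + 1) 1 0 0 = true
    · simp only [hc, and_self, if_true]
      have : ans + 1 ≤ M := by
        by_contra hcon
        push Not at hcon
        rw [hub (ans + 1) (by omega) hc.1] at hc
        exact absurd hc.2 (by simp)
      omega
    · have hMa : M = ans := by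
        by_cases hle : ans + 1 ≤ hi
        · by_cases hch : bCheck cum N total (ans + 1) 1 0 0 = true
          · exact absurd ⟨hle, hch⟩ hc
          · have : M < ans + 1 := by
              by_contra hcon
              push Not at hcon
              exact hch (hmono (ans + 1) M hcon hM)
            omega
        · omega
      simp only [hc, if_false]
      omega
  | succ k ih =>
    intro ans hl hr
    rw [bBits]
    have h2k0 : (0:Int) < 2 ^ (k + 1) := by positivity
    have h2k : (1:Int) ≤ 2 ^ (k + 1) := by omega
    simp only [h2k, dite_true]
    have hhalf : PySem.Int.floordiv ((2:Int) ^ (k + 1)) 2 = 2 ^ k := by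
      rw [PySem.Int.floordiv_eq_ediv_of_pos (by omega), pow_succ]
      omega
    rw [hhalf]
    by_cases hc : ans + 2 ^ (k + 1) ≤ hi ∧ bCheck cum N total (ans + 2 ^ (k + 1)) 1 0 0 = true
    · simp only [hc, and_self, if_true]
      have hstep : ans + 2 ^ (k + 1) ≤ M := by
        by_contra hcon
        push Not at hcon
        rw [hub _ (by omega) hc.1] at hc
        exact absurd hc.2 (by simp)
      apply ih _ hstep
      have : (2:Int) * 2 ^ k = 2 ^ (k + 1) := by ring
      omega
    · have hlt : M < ans + 2 ^ (k + 1) := by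
        by_cases hle : ans + 2 ^ (k + 1) ≤ hi
        · by_cases hch : bCheck cum N total (ans + 2 ^ (k + 1)) 1 0 0 = true
          · exact absurd ⟨hle, hch⟩ hc
          · by_contra hcon
            push Not at hcon
            exact hch (hmono _ M hcon hM)
        · omega
      simp only [hc, if_false]
      apply ih _ hl
      have : (2:Int) * 2 ^ k = 2 ^ (k + 1) := by ring
      omega

-- A's binary search is the identity on a degenerate interval
lemma pvALoopBase (cum : List Int) (N total l r : Int) (h : ¬ r - l > 1) :
    aLoop cum N total l r = l := by
  rw [aLoop]
  simp [h]

-- with an everywhere-false check, A's binary search never moves 'left'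
lemma pvALoopFalse (cum : List Int) (N total : Int)
    (hall : ∀ mid, aCheck cum N total mid 1 = false) :
    ∀ (n : Nat) (l r : Int), (r - l).toNat ≤ n → aLoop cum N total l r = l := by
  intro n
  induction n with
  | zero =>
    intro l r hm
    rw [aLoop]
    have : ¬ r - l > 1 := by omega
    simp [this]
  | succ n ih =>
    intro l r hm
    rw [aLoop]
    by_cases hc : r - l > 1
    · simp only [hc, dite_true]
      have hb := PySem.Int.floordiv_two_mid_bounds (lo := l + 1) (hi := r - 1) (by omega)
      rw [show l + 1 + (r - 1) = l + r by ring] at hb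
      rw [hall (PySem.Int.floordiv (l + r) 2)]
      simp only [Bool.false_eq_true, if_false]
      exact ih l _ (by omega)
    · simp [hc]

-- with an everywhere-false check, B's bit loop never moves 'ans'
lemma pvBBitsFalse (cum : List Int) (N total hi : Int)
    (hall : ∀ mid, bCheck cum N total mid 1 0 0 = false) :
    ∀ (n : Nat) (ans step : Int), step.toNat ≤ n → bBits cum N total hi ans step = ans := by
  intro n
  induction n with
  | zero =>
    intro ans step hm
    rw [bBits]
    have : ¬ (1:Int) ≤ step := by omega
    simp [this]
  | succ n ih =>
    intro ans step hm
    rw [bBits]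
    by_cases hc : (1:Int) ≤ step
    · simp only [hc, dite_true]
      rw [hall (ans + step)]
      simp only [Bool.false_eq_true, and_false, if_false]
      apply ih
      rw [PySem.Int.floordiv_eq_ediv_of_pos (by omega)]
      omega
    · simp [hc]

-- when no candidate fits under hi ≤ 0, B's bit loop returns 0
lemma pvBBitsLowHi (cum : List Int) (N total hi : Int) (hhi : hi ≤ 0) :
    ∀ (n : Nat) (step : Int), step.toNat ≤ n → bBits cum N total hi 0 step = 0 := by
  intro n
  induction n with
  | zero =>
    intro step hm
    rw [bBits]
    have : ¬ (1:Int) ≤ step := by omega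
    simp [this]
  | succ n ih =>
    intro step hm
    rw [bBits]
    by_cases hc : (1:Int) ≤ step
    · simp only [hc, dite_true]
      have : ¬ ((0:Int) + step ≤ hi ∧ bCheck cum N total (0 + step) 1 0 0 = true) := by
        intro ⟨h', _⟩; omega
      simp only [this, if_false]
      apply ih
      rw [PySem.Int.floordiv_eq_ediv_of_pos (by omega)]
      omega
    · simp [hc]

-- ===== VERDICT (by name: the statement is the Claim_ definition above) =====
theorem max_min_piece_spec : Claim_equal_max_min_piece := by
  intro N A _ hpre
  obtain ⟨hlen, hd⟩ := hpre
  unfold Spec_max_min_piece max_min_piece max_min_piece_alt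
  rw [show bCum A = aCum A from rfl]
  set cum := aCum A with hcum
  set total := PySem.List.pyGetD cum (-1) 0 with htotal
  set R := PySem.Int.floordiv total 3 with hR
  set hi := R - 1 with hhi
  by_cases hN1 : 1 ≤ N
  · -- N ≥ 1: Pre_ gives nonnegative elements, hence sorted prefix sums
    have hpos : ∀ a ∈ A, 0 ≤ a := by
      rcases hd with h | h
      · omega
      · exact h
    have hs : cum.Pairwise (· ≤ ·) := pvScanl_pairwise 0 A hpos
    have hNlen : N + 1 ≤ (cum.length : Int) := by
      have : cum.length = A.length + 1 := List.length_scanl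
      omega
    have hcne : cum ≠ [] := by
      have : cum.length = A.length + 1 := List.length_scanl
      intro hnil
      rw [hnil] at this
      simp at this
    have htot0 : 0 ≤ total := by
      rw [htotal, PySem.List.pyGetD_neg_one cum 0 hcne]
      exact pvScanl_le 0 A hpos _ (List.getLast_mem hcne)
    have hcheckEq : ∀ mid, aCheck cum N total mid 1 = bCheck cum N total mid 1 0 0 := by
      intro mid
      apply pvCheckEq cum N total mid hs hNlen (N + 1 - 1).toNat 1 0 0 (le_refl _)
        (le_refl _) (le_refl _) (le_refl _) (by omega) (by omega) (by positivity)
      intro _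
      positivity
    by_cases hR1 : R ≤ 1
    · -- search interval empty on both sides: both return 0
      rw [pvALoopBase cum N total 0 R (by omega),
          pvBBitsLowHi cum N total hi (by omega) (bPow hi 1).toNat _ (le_refl _)]
    · -- the common value is the greatest feasible threshold M ≤ hi
      have hP0 : aCheck cum N total 0 1 = true :=
        pvCheckZero A N hpos hN1 hNlen hs htot0
      have hmono : ∀ a b : Int, a ≤ b → aCheck cum N total b 1 = true →
          aCheck cum N total a 1 = true :=
        fun a b hab => pvCheckMono cum N total hs hNlen hab
      set Pn : Nat → Prop := fun k => aCheck cum N total (k : Int) 1 = true with hPn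
      have hdec : DecidablePred Pn := fun k => by rw [hPn]; infer_instance
      set Mn : Nat := Nat.findGreatest Pn hi.toNat with hMn
      set M : Int := (Mn : Int) with hM
      have hPM : aCheck cum N total M 1 = true := by
        have := Nat.findGreatest_spec (P := Pn) (m := 0) (n := hi.toNat) (by omega) hP0
        exact this
      have hMhi : M ≤ hi := by
        have := Nat.findGreatest_le (P := Pn) hi.toNat
        omega
      have hub : ∀ m, M < m → m ≤ hi → aCheck cum N total m 1 = false := by
        intro m h1 h2
        have hm0 : 0 ≤ m := by omega
        have := Nat.findGreatest_is_greatest (P := Pn) (k := m.toNat) (n := hi.toNat)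
          (by omega) (by omega)
        have hmc : ((m.toNat : Nat) : Int) = m := by omega
        simp only [hPn] at this
        rw [hmc] at this
        simpa using this
      have hA : aLoop cum N total 0 R = M :=
        pvALoopMax cum N total M hmono hPM (R - 0).toNat 0 R (le_refl _) (by omega)
          (by omega) (fun m h1 h2 => hub m h1 (by omega))
      have hpow := pvBPow hi (hi - 1).toNat 1 (le_refl _) (le_refl _) ⟨0, by norm_num⟩
      obtain ⟨⟨k, hk⟩, hstep, hbig⟩ := hpow
      have hB : bBits cum N total hi 0 (bPow hi 1) = M := by
        rw [hk]
        apply pvBBitsMax cum N total hi M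
          (fun a b hab hch => by
            rw [← hcheckEq a, ← hcheckEq b] at *
            exact hmono a b hab hch)
          (by rw [← hcheckEq]; exact hPM) hMhi
          (fun m h1 h2 => by rw [← hcheckEq]; exact hub m h1 h2)
          k 0 (by omega) (by omega)
      rw [hA, hB]
  · -- N ≤ 0: both feasibility checks are vacuously false, both searches return 0
    have haf : ∀ mid, aCheck cum N total mid 1 = false := by
      intro mid
      rw [aCheck]
      simp only [show ¬ (1:Int) ≤ N by omega, dite_false]
    have hbf : ∀ mid, bCheck cum N total mid 1 0 0 = false := by
      intro mid
      rw [bCheck]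
      simp only [show ¬ (1:Int) ≤ N by omega, dite_false]
    rw [pvALoopFalse cum N total haf (R - 0).toNat 0 R (le_refl _),
        pvBBitsFalse cum N total hi hbf (bPow hi 1).toNat 0 _ (le_refl _)]
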